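-- pv_equiv track=rewrite | github.com/JoachimKoenigslieb/leath | analysis/plotting.py | sort_n
-- ===== SOURCE A (Python) =====
-- def getn(filename):
--     n_index = filename.index('n') #finds the first 'n'. Walks trough stirng untill finds a not number
--     for j,c in enumerate(filename[n_index+1:]): #holy shit who writes this kind of shit code..?
--         if c.isalpha():
--             break
--     return int(filename[n_index+1:n_index+j+1])
--
-- def sort_n(d, files):
--     num_set = set()
--     for f in files: #lets get all N's in the dataset.
--         num = getn(f)
--         if num not in num_set:
--             num_set.add(int(num))
--             d[num] = []
--         d[num].append(f)
--     return d
-- ===== SOURCE B (Python) =====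
-- def getn(filename):
--     n_index = filename.index('n')
--     for j, c in enumerate(filename[n_index+1:]):
--         if c.isalpha():
--             break
--     return int(filename[n_index+1:n_index+j+1])
--
-- def sort_n(d, files):
--     # staged: extract every key once, then build each group wholesale by
--     # filtering the full file list for that key (first-appearance key order).
--     ns = [getn(f) for f in files]
--     for num in dict.fromkeys(ns):
--         d[num] = [f for f, m in zip(files, ns) if m == num]
--     return d
-- ===== Notes on version B (the rewrite author's own statement) =====
-- stated objective: alternative
-- what changed: A's single pass that grows d[num] incrementally under a seen-set is replaced by staged passes: compute all keys, dedup them with dict.fromkeys, and for each distinct key build its whole group in one filtering scan of the file list before assigning it into d.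
import Mathlib
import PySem

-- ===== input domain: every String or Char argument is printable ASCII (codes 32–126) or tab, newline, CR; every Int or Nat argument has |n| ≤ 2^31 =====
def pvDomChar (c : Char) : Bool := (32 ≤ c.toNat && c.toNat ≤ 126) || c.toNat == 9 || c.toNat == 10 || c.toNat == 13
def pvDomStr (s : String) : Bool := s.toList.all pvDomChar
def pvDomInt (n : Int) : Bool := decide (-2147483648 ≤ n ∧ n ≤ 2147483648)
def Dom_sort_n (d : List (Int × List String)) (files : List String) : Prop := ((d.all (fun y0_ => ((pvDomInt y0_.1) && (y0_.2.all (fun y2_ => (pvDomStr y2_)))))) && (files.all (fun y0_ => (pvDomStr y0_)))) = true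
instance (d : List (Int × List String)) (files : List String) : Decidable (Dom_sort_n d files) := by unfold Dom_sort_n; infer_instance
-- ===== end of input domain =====

-- B replaces A's single pass (seen-set + reset-then-append into d) by staged passes: extract all
-- keys, dedup them, then build each group wholesale by filtering the full file list; equivalence
-- is about the RETURN value (both Pythons also mutate d in place, reaching the same final state).

-- ===== PORT A =====
-- shared helper: Python getn(filename); none exactly where getn raises
-- (ValueError from .index / int(), or NameError when the loop body never runs).
-- The loop `for j,c in enumerate(tail): if c.isalpha(): break`: after it, j is the index of the
-- first alphabetic char, or len(tail)-1 if none, or unbound (none) on empty tail.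
def getnJ : List Char → Nat → Option Nat
  | [], _ => none
  | c :: rest, j =>
    if PySem.Chars.isalpha c then some j
    else
      match getnJ rest (j + 1) with
      | none => some j
      | some j' => some j'

-- filename[n_index+1 : n_index+j+1] with these non-negative in-range bounds is (drop (ni+1)).take j
def getn? (filename : String) : Option Int :=
  let cs := filename.toList
  match PySem.List.index? cs 'n' with
  | none => none
  | some ni =>
    match getnJ (cs.drop (ni + 1)) 0 with
    | none => none
    | some j => PySem.Int.ofChars? ((cs.drop (ni + 1)).take j)

-- one iteration of A's loop body (d[num] = [] is dict assignment; d[num].append(f) is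
-- PySem.Dict.modify, exact here since num is always a present key at that point)
def sortStep (st : PySem.Set Int × PySem.Dict Int (List String)) (f : String) :
    PySem.Set Int × PySem.Dict Int (List String) :=
  match getn? f with
  | none => st
  | some num =>
    let st1 := if PySem.Set.contains st.1 num then st
               else (PySem.Set.add st.1 num, st.2.insert num [])
    (st1.1, st1.2.modify num [] (fun xs => xs ++ [f]))

def sort_n (d : List (Int × List String)) (files : List String) : List (Int × List String) :=
  ((files.foldl sortStep (PySem.Set.empty, PySem.Dict.mk d)).2).items

-- ===== PORT B =====
-- ns = [getn(f) for f in files] : per-file keys (none = getn raises there, outside Pre_);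
-- dict.fromkeys(ns) is PySem.List.dedup (a none entry, unreachable under Pre_, is skipped);
-- d[num] = [f for f, m in zip(files, ns) if m == num] : one filtering scan per distinct key.
def sort_n_alt (d : List (Int × List String)) (files : List String) : List (Int × List String) :=
  let ns := files.map getn?
  ((PySem.List.dedup (ns.filterMap id)).foldl (fun dd num =>
      dd.insert num ((files.zip ns).filterMap
        (fun p => if p.2 == some num then some p.1 else none)))
    (PySem.Dict.mk d)).items

-- ===== PRECONDITION & SPEC =====
-- Pre_ excludes exactly the files on which Python's getn raises (no 'n' in the name → ValueError
-- from .index; nothing after the first 'n' → unbound loop variable, NameError; a non-integer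
-- segment after 'n' → ValueError from int()); A returns on every input admitted here.
-- Stated in closed form on each file name: writing tail for the characters after the first 'n',
-- tail must be nonempty and int() must accept its prefix up to the first alphabetic character
-- (or all but its last character, if it has no alphabetic character).
def Pre_sort_n (d : List (Int × List String)) (files : List String) : Prop :=
  ∀ f ∈ files,
    'n' ∈ f.toList ∧
    (f.toList.drop (f.toList.idxOf 'n' + 1)) ≠ [] ∧
    (PySem.Int.ofChars? ((f.toList.drop (f.toList.idxOf 'n' + 1)).take
        (((f.toList.drop (f.toList.idxOf 'n' + 1)).findIdx? (fun c => PySem.Chars.isalpha c)).getD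
          ((f.toList.drop (f.toList.idxOf 'n' + 1)).length - 1)))).isSome = true
instance (d : List (Int × List String)) (files : List String) : Decidable (Pre_sort_n d files) := by
  unfold Pre_sort_n; infer_instance
def pvWitness_sort_n : (List (Int × List String)) × List String :=
  ([(5, ["keep"])], ["n1a", "run23x", "n1a"])

def Spec_sort_n (d : List (Int × List String)) (files : List String) (out : List (Int × List String)) : Prop := out = sort_n_alt d files
instance (d : List (Int × List String)) (files : List String) (out : List (Int × List String)) : Decidable (Spec_sort_n d files out) := by unfold Spec_sort_n; infer_instance

-- ===== CLAIM (what is proved, stated in full; the proofs are below) =====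
def Claim_equal_sort_n : Prop := ∀ (d : List (Int × List String)) (files : List String), Dom_sort_n d files → Pre_sort_n d files → Spec_sort_n d files (sort_n d files)

-- ===== LEMMAS AND PROOFS =====

-- proof-side intermediate: the grouping dict A builds implicitly (groups[num] += [f] per file)
def groupStep (g : PySem.Dict Int (List String)) (f : String) : PySem.Dict Int (List String) :=
  match getn? f with
  | none => g
  | some num => g.modify num [] (fun xs => xs ++ [f])

-- proof-side: assigning a pair list into a dict in order
def assignL (d : PySem.Dict Int (List String)) (l : List (Int × List String)) :
    PySem.Dict Int (List String) :=
  l.foldl (fun dd kv => dd.insert kv.1 kv.2) d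

-- proof-side: B's group of a key, in filterMap-over-files form
def gOf (files : List String) (num : Int) : List String :=
  files.filterMap (fun f => if getn? f == some num then some f else none)

theorem get?_assignL_not_mem (l : List (Int × List String)) (d : PySem.Dict Int (List String))
    (k : Int) (hk : k ∉ l.map Prod.fst) : (assignL d l).get? k = d.get? k := by
  induction l generalizing d with
  | nil => rfl
  | cons p t ih =>
    simp only [List.map_cons, List.mem_cons, not_or] at hk
    simp only [assignL, List.foldl_cons] at *
    rw [ih _ hk.2, PySem.Dict.get?_insert_of_ne _ _ hk.1]

theorem get?_assignL_mem (l : List (Int × List String)) (d : PySem.Dict Int (List String))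
    (k : Int) (v : List String) (hnd : (l.map Prod.fst).Nodup) (hm : (k, v) ∈ l) :
    (assignL d l).get? k = some v := by
  induction l generalizing d with
  | nil => simp at hm
  | cons p t ih =>
    simp only [List.map_cons, List.nodup_cons] at hnd
    rcases List.mem_cons.mp hm with h | h
    · subst h
      show (assignL (d.insert k v) t).get? k = some v
      rw [get?_assignL_not_mem _ _ _ hnd.1, PySem.Dict.get?_insert_self]
    · exact ih _ hnd.2 h

theorem insert_insert_comm_contains (e : PySem.Dict Int (List String)) (k k' : Int)
    (v v' : List String) (hne : k ≠ k') (hc : e.contains k = true) :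
    (e.insert k' v').insert k v = (e.insert k v).insert k' v' := by
  have hck : (e.insert k' v').contains k = true := by
    rw [PySem.Dict.contains_insert]; simp [hc]
  apply PySem.Dict.ext
  by_cases hc' : e.contains k' = true
  · have hck' : (e.insert k v).contains k' = true := by
      rw [PySem.Dict.contains_insert]; simp [hc']
    rw [PySem.Dict.items_insert_of_contains _ v hck,
        PySem.Dict.items_insert_of_contains _ v' hc',
        PySem.Dict.items_insert_of_contains _ v' hck',
        PySem.Dict.items_insert_of_contains _ v hc]
    simp only [List.map_map]
    apply List.map_congr_left
    intro p _
    by_cases h1 : p.1 = k' <;> by_cases h2 : p.1 = k <;>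
      simp [Function.comp, h1, h2, hne, Ne.symm hne]
  · have hc'2 : e.contains k' = false := by simpa using hc'
    have hck'2 : (e.insert k v).contains k' = false := by
      rw [PySem.Dict.contains_insert]; simp [hc'2, Ne.symm hne]
    rw [PySem.Dict.items_insert_of_contains _ v hck,
        PySem.Dict.items_insert_of_not_contains _ v' hc'2,
        PySem.Dict.items_insert_of_not_contains _ v' hck'2,
        PySem.Dict.items_insert_of_contains _ v hc]
    rw [List.map_append]
    simp [Ne.symm hne]

theorem assignL_insert_of_contains (l : List (Int × List String)) (e : PySem.Dict Int (List String))
    (k : Int) (v : List String) (hc : e.contains k = true) (hk : k ∉ l.map Prod.fst) :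
    assignL (e.insert k v) l = (assignL e l).insert k v := by
  induction l generalizing e with
  | nil => rfl
  | cons p t ih =>
    simp only [List.map_cons, List.mem_cons, not_or] at hk
    show assignL ((e.insert k v).insert p.1 p.2) t = (assignL (e.insert p.1 p.2) t).insert k v
    rw [← insert_insert_comm_contains e k p.1 v p.2 hk.1 hc]
    exact ih _ (by rw [PySem.Dict.contains_insert]; simp [hc]) hk.2

theorem assignL_map_replace (l : List (Int × List String)) (d : PySem.Dict Int (List String))
    (k : Int) (v : List String) (hnd : (l.map Prod.fst).Nodup) (hm : k ∈ l.map Prod.fst) :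
    assignL d (l.map (fun p => if p.1 == k then (k, v) else p)) = (assignL d l).insert k v := by
  induction l generalizing d with
  | nil => simp at hm
  | cons p t ih =>
    simp only [List.map_cons, List.nodup_cons] at hnd
    by_cases h1 : p.1 = k
    · have ht : ∀ q ∈ t, (fun p => if p.1 == k then (k, v) else p) q = q := by
        intro q hq
        have : q.1 ≠ k := fun h => hnd.1 (h1 ▸ h ▸ List.mem_map.mpr ⟨q, hq, rfl⟩)
        simp [this]
      have ht2 : t.map (fun p => if p.1 == k then (k, v) else p) = t := by
        rw [List.map_congr_left ht]; exact List.map_id _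
      show assignL d ((if p.1 == k then (k, v) else p) :: t.map _) = _
      rw [ht2, show (if p.1 == k then ((k : Int), v) else p) = (k, v) by simp [h1]]
      show assignL (d.insert k v) t = (assignL (d.insert p.1 p.2) t).insert k v
      rw [← assignL_insert_of_contains t (d.insert p.1 p.2) k v
            (by rw [PySem.Dict.contains_insert]; simp [h1]) (h1 ▸ hnd.1),
          show (d.insert p.1 p.2).insert k v = d.insert k v from by
            rw [h1, PySem.Dict.insert_insert_self]]
    · have hm' : k ∈ t.map Prod.fst := by
        rcases List.mem_cons.mp hm with h | h
        · exact absurd h.symm h1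
        · exact h
      show assignL d ((if p.1 == k then (k, v) else p) :: t.map _) = _
      rw [show (if p.1 == k then ((k : Int), v) else p) = p by simp [h1]]
      exact ih _ hnd.2 hm'

theorem assignL_insert (g : PySem.Dict Int (List String)) (d : PySem.Dict Int (List String))
    (k : Int) (v : List String) (hnd : g.keys.Nodup) :
    assignL d (g.insert k v).items = (assignL d g.items).insert k v := by
  by_cases hc : g.contains k = true
  · rw [PySem.Dict.items_insert_of_contains _ v hc]
    have hm : k ∈ g.items.map Prod.fst := by
      simpa [PySem.Dict.keys] using (PySem.Dict.contains_iff_mem_keys _ _).mp hc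
    exact assignL_map_replace _ _ _ _ (by simpa [PySem.Dict.keys] using hnd) hm
  · rw [PySem.Dict.items_insert_of_not_contains _ v (by simpa using hc)]
    simp [assignL, List.foldl_append]

theorem get?_assignL_contains (g : PySem.Dict Int (List String)) (d : PySem.Dict Int (List String))
    (k : Int) (hnd : g.keys.Nodup) (hc : g.contains k = true) :
    (assignL d g.items).get? k = g.get? k := by
  rw [PySem.Dict.contains_eq_isSome_get?] at hc
  obtain ⟨v, hv⟩ := Option.isSome_iff_exists.mp hc
  rw [hv]
  exact get?_assignL_mem _ _ _ _ (by simpa [PySem.Dict.keys] using hnd)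
    (PySem.Dict.mem_items_of_get?_eq_some _ hv)

-- loop invariant: A's running dict is d updated with the groups collected so far,
-- and A's seen-set holds exactly the keys of those groups
theorem loop_eq (files : List String) (ns : PySem.Set Int) (g : PySem.Dict Int (List String))
    (d : PySem.Dict Int (List String)) (hnd : g.keys.Nodup)
    (hinv : ∀ k, PySem.Set.contains ns k = g.contains k) :
    (files.foldl sortStep (ns, assignL d g.items)).2 = assignL d (files.foldl groupStep g).items := by
  induction files generalizing ns g with
  | nil => rfl
  | cons f fs ih =>
    simp only [List.foldl_cons]
    rcases hg : getn? f with _ | num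
    · have h1 : sortStep (ns, assignL d g.items) f = (ns, assignL d g.items) := by
        simp [sortStep, hg]
      have h2 : groupStep g f = g := by simp [groupStep, hg]
      rw [h1, h2]; exact ih ns g hnd hinv
    · have h2 : groupStep g f = g.modify num [] (fun xs => xs ++ [f]) := by
        simp [groupStep, hg]
      rw [h2]
      by_cases hc : g.contains num = true
      · have hR : g.modify num [] (fun xs => xs ++ [f])
            = g.insert num (g.getD num [] ++ [f]) := rfl
        have h1 : sortStep (ns, assignL d g.items) f
            = (ns, (assignL d g.items).modify num [] (fun xs => xs ++ [f])) := by
          have hmem : num ∈ ns := (PySem.Set.contains_iff _ _).mp ((hinv num).trans hc)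
          simp [sortStep, hg, hmem]
        have hgd : (assignL d g.items).getD num [] = g.getD num [] := by
          rw [PySem.Dict.getD_eq_get?_getD, get?_assignL_contains g d num hnd hc,
              PySem.Dict.getD_eq_get?_getD]
        have hL : (assignL d g.items).modify num [] (fun xs => xs ++ [f])
            = (assignL d g.items).insert num (g.getD num [] ++ [f]) := by
          show (assignL d g.items).insert num ((assignL d g.items).getD num [] ++ [f]) = _
          rw [hgd]
        rw [h1, hL, hR, ← assignL_insert g d num _ hnd]
        apply ih ns _ (PySem.Dict.nodup_keys_insert _ _ _ hnd)
        intro k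
        rw [hinv k, PySem.Dict.contains_insert]
        by_cases hk : k = num <;> simp [hk, hc]
      · have hcf : g.contains num = false := by simpa using hc
        have hR : g.modify num [] (fun xs => xs ++ [f]) = g.insert num [f] := by
          show g.insert num (g.getD num [] ++ [f]) = _
          rw [PySem.Dict.getD_of_not_contains _ _ hcf, List.nil_append]
        have h1 : sortStep (ns, assignL d g.items) f
            = (PySem.Set.add ns num,
               ((assignL d g.items).insert num []).modify num [] (fun xs => xs ++ [f])) := by
          have hmem : num ∉ ns := fun hm => by
            have h1 : PySem.Set.contains ns num = true := (PySem.Set.contains_iff _ _).mpr hm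
            rw [hinv num, hcf] at h1
            exact absurd h1 (by simp)
          simp [sortStep, hg, hmem]
        have hL : ((assignL d g.items).insert num []).modify num [] (fun xs => xs ++ [f])
            = (assignL d g.items).insert num [f] := by
          show ((assignL d g.items).insert num []).insert num
              ((((assignL d g.items).insert num []).getD num []) ++ [f]) = _
          rw [PySem.Dict.getD_insert_self, PySem.Dict.insert_insert_self, List.nil_append]
        rw [h1, hL, hR, ← assignL_insert g d num _ hnd]
        apply ih _ _ (PySem.Dict.nodup_keys_insert _ _ _ hnd)
        intro k
        rw [PySem.Dict.contains_insert]
        by_cases hk : k = num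
        · subst hk
          have hm : k ∈ PySem.Set.add ns k := (PySem.Set.mem_add _ _ _).mpr (Or.inr rfl)
          rw [(PySem.Set.contains_iff _ _).mpr hm]
          simp
        · have hadd : PySem.Set.contains (PySem.Set.add ns num) k = PySem.Set.contains ns k := by
            rw [Bool.eq_iff_iff, PySem.Set.contains_iff, PySem.Set.contains_iff,
                PySem.Set.mem_add]
            exact ⟨fun h => h.elim id (fun h => absurd h hk), Or.inl⟩
          rw [hadd, hinv k]
          simp [hk]

-- the grouping dict, characterised in B's staged form: its items are exactly the distinct keys
-- in first-appearance order, each paired with its full filtered group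
theorem G_items (files : List String) :
    (files.foldl groupStep (PySem.Dict.mk [])).items
      = (PySem.List.dedup (files.filterMap getn?)).map (fun k => (k, gOf files k)) := by
  induction files using List.reverseRecOn with
  | nil => rfl
  | append_singleton fs f ih =>
    rw [List.foldl_append, List.foldl_cons, List.foldl_nil, List.filterMap_append]
    rcases hg : getn? f with _ | num
    · have h2 : groupStep (fs.foldl groupStep (PySem.Dict.mk [])) f
          = fs.foldl groupStep (PySem.Dict.mk []) := by simp [groupStep, hg]
      have h3 : ∀ k, gOf (fs ++ [f]) k = gOf fs k := by
        intro k; simp [gOf, List.filterMap_append, hg]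
      have hf0 : List.filterMap getn? [f] = [] := by simp [hg]
      rw [h2, ih, hf0, List.append_nil]
      exact (List.map_congr_left (fun k _ => by rw [h3 k])).symm
    · set G := fs.foldl groupStep (PySem.Dict.mk []) with hG
      set L := fs.filterMap getn? with hLdef
      have hkeys : G.keys = PySem.List.dedup L := by
        simp only [PySem.Dict.keys, ih, List.map_map]
        exact List.map_id _
      have hnd : G.keys.Nodup := by rw [hkeys]; exact PySem.List.nodup_dedup _
      have h2 : groupStep G f = G.insert num (G.getD num [] ++ [f]) := by
        simp only [groupStep, hg]; rfl
      have hmemiff : G.contains num = true ↔ num ∈ L := by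
        rw [PySem.Dict.contains_iff_mem_keys, hkeys, PySem.List.mem_dedup]
      have hded : PySem.List.dedup (L ++ [num])
          = if num ∈ L then PySem.List.dedup L else PySem.List.dedup L ++ [num] := by
        rw [PySem.List.dedup_eq_ofList, PySem.List.dedup_eq_ofList, PySem.Set.ofList_append,
            PySem.Set.update_cons, PySem.Set.update_nil]
        by_cases hm : num ∈ L
        · simp [PySem.Set.add, hm]
        · simp [PySem.Set.add, hm]
      have hgOf : ∀ k, gOf (fs ++ [f]) k
          = gOf fs k ++ (if num = k then [f] else []) := by
        intro k
        simp only [gOf, List.filterMap_append, List.filterMap_cons, List.filterMap_nil, hg]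
        by_cases hk : num = k <;> simp [hk]
      have hf1 : List.filterMap getn? [f] = [num] := by simp [hg]
      rw [h2, hf1]
      by_cases hm : num ∈ L
      · have hc : G.contains num = true := hmemiff.mpr hm
        rw [PySem.Dict.items_insert_of_contains _ _ hc, ih, hded, if_pos hm, List.map_map]
        apply List.map_congr_left
        intro k _
        by_cases hk : k = num
        · subst hk
          have hpair : (k, gOf fs k) ∈ G.items := by
            rw [ih]; exact List.mem_map.mpr ⟨k, (PySem.List.mem_dedup _ _).mpr hm, rfl⟩
          have : G.getD k [] = gOf fs k := PySem.Dict.getD_of_mem_items _ hpair hnd []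
          simp [Function.comp, this, hgOf k]
        · have hkn : num ≠ k := fun h => hk h.symm
          simp [Function.comp, hk, hgOf k, hkn]
      · have hc : G.contains num = false := by
          rw [← Bool.not_eq_true]; exact fun h => hm (hmemiff.mp h)
        have hnumgroup : gOf fs num = [] := by
          rw [gOf, List.filterMap_eq_nil_iff]
          intro a ha
          by_cases h : getn? a = some num
          · exact absurd (List.mem_filterMap.mpr ⟨a, ha, h⟩) hm
          · simp [h]
        rw [PySem.Dict.items_insert_of_not_contains _ _ hc,
            PySem.Dict.getD_of_not_contains _ _ hc, ih, hded, if_neg hm, List.map_append]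
        congr 1
        · apply List.map_congr_left
          intro k hk
          have hkL : k ∈ L := (PySem.List.mem_dedup _ _).mp hk
          have : num ≠ k := fun h => hm (h ▸ hkL)
          simp [hgOf k, this]
        · simp [hgOf num, hnumgroup]

-- B in assignL form: its foldl over the deduped keys is the assignment of the grouping
-- dict's items into d
theorem alt_eq (d : List (Int × List String)) (files : List String) :
    sort_n_alt d files
      = (assignL (PySem.Dict.mk d) ((files.foldl groupStep (PySem.Dict.mk [])).items)).items := by
  have hzip : files.zip (files.map getn?) = files.map (fun f => (f, getn? f)) := by
    induction files with
    | nil => rfl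
    | cons a t ih => simp [List.zip_cons_cons, ih]
  have hfm : (files.map getn?).filterMap id = files.filterMap getn? := by
    simp [List.filterMap_map]
  have hgroup : ∀ num, (files.zip (files.map getn?)).filterMap
      (fun p => if p.2 == some num then some p.1 else none) = gOf files num := by
    intro num
    rw [hzip, List.filterMap_map]
    rfl
  unfold sort_n_alt assignL
  show ((PySem.List.dedup ((files.map getn?).filterMap id)).foldl (fun dd num =>
      dd.insert num ((files.zip (files.map getn?)).filterMap
        (fun p => if p.2 == some num then some p.1 else none)))
    (PySem.Dict.mk d)).items = _
  rw [G_items, List.foldl_map, hfm]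
  simp only [hgroup]

-- ===== VERDICT (by name: the statement is the Claim_ definition above) =====
theorem sort_n_spec : Claim_equal_sort_n := by
  intro d files _ _
  unfold Spec_sort_n sort_n
  have h := loop_eq files PySem.Set.empty (PySem.Dict.mk []) (PySem.Dict.mk d)
    (by simp [PySem.Dict.keys]) (by intro k; simp [PySem.Set.empty, PySem.Set.contains, PySem.Dict.contains])
  rw [alt_eq]
  simpa [assignL, PySem.Dict.items] using congrArg PySem.Dict.items h
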